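-- pv_equiv track=rewrite | github.com/PerFumeOnMe/fast-api | app/services/pbti/mbti_analyzer.py | calculate_keywords_by_text
-- ===== SOURCE A (Python) =====
-- from typing import List
--
-- def calculate_keywords_by_text(answers: List[str]) -> List[str]:
--     q1, q2, q3, q4, q5, q6, q7, q8 = answers
--
--     e_score = i_score = s_score = n_score = t_score = f_score = j_score = p_score = 0
--
--     # Q1~Q2 → E/I
--     if any(word in q1 for word in ["칫솔을", "바로"]):
--         e_score += 1
--     if any(word in q1 for word in ["수건으로", "닦고"]):
--         i_score += 1
--
--     if any(word in q2 for word in ["버튼", "분사해"]):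
--         e_score += 1
--     if any(word in q2 for word in ["중간에", "내리는"]):
--         i_score += 1
--
--     # Q3~Q4 → S/N
--     if any(word in q3 for word in ["알림처럼", "미리"]):
--         s_score += 1
--     if any(word in q3 for word in ["버스가", "가방에서 꺼내"]):
--         n_score += 1
--
--     if any(word in q4 for word in ["신호가 바뀌기 직전", "분사해"]):
--         s_score += 1
--     if any(word in q4 for word in ["기다리다", "향이 옅어지면"]):
--         n_score += 1
--
--     # Q5~Q6 → T/F
--     if any(word in q5 for word in ["공간", "퍼뜨린다"]):
--         t_score += 1
--     if any(word in q5 for word in ["기분", "헹굴 때마다"]):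
--         f_score += 1
--
--     if any(word in q6 for word in ["목줄", "가볍게"]):
--         t_score += 1
--     if any(word in q6 for word in ["손목에", "레이어링한다"]):
--         f_score += 1
--
--     # Q7~Q8 → J/P
--     if any(word in q7 for word in ["리모컨을", "채널을 돌리며"]):
--         j_score += 1
--     if any(word in q7 for word in ["광고가", "확실히"]):
--         p_score += 1
--
--     if any(word in q8 for word in ["이불 위에서", "잔향을"]):
--         j_score += 1
--     if any(word in q8 for word in ["중앙에서", "톡톡"]):
--         p_score += 1
--
--     # 키워드 결정
--     keyword1 = (
--         "긍정적 임팩트를 가진 당신" if e_score > i_score else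
--         "은은한 집중형인 당신" if e_score < i_score else
--         "외향과 내향의 균형을 지닌 당신"
--     )
--     keyword2 = (
--         "촉각에 민감한 당신" if s_score > n_score else
--         "직관으로 이끄는 당신" if s_score < n_score else
--         "감각과 직관을 오가는 당신"
--     )
--     keyword3 = (
--         "세부까지 놓치지 않는 당신" if t_score > f_score else
--         "감성을 우선하는 당신" if t_score < f_score else
--         "사고와 감정을 조화시키는 당신"
--     )
--     keyword4 = (
--         "미리 움직이는 당신" if j_score > p_score else
--         "순간을 즐기는 당신" if j_score < p_score else
--         "계획과 즉흥이 공존하는 당신"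
--     )
--
--     return [keyword1, keyword2, keyword3, keyword4]
-- ===== SOURCE B (Python) =====
-- from typing import List
--
-- # Signed-score rewrite: each of the 8 questions contributes +1/0/-1 to its axis
-- # (plus-pole hit minus minus-pole hit); consecutive contributions are summed
-- # pairwise by a recursive helper, and each axis keyword is chosen by the SIGN
-- # of its single signed score instead of comparing two counters.
--
-- _WORDS = [
--     (["칫솔을", "바로"], ["수건으로", "닦고"]),
--     (["버튼", "분사해"], ["중간에", "내리는"]),
--     (["알림처럼", "미리"], ["버스가", "가방에서 꺼내"]),
--     (["신호가 바뀌기 직전", "분사해"], ["기다리다", "향이 옅어지면"]),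
--     (["공간", "퍼뜨린다"], ["기분", "헹굴 때마다"]),
--     (["목줄", "가볍게"], ["손목에", "레이어링한다"]),
--     (["리모컨을", "채널을 돌리며"], ["광고가", "확실히"]),
--     (["이불 위에서", "잔향을"], ["중앙에서", "톡톡"]),
-- ]
--
-- _KEYWORDS = [
--     ("긍정적 임팩트를 가진 당신", "은은한 집중형인 당신", "외향과 내향의 균형을 지닌 당신"),
--     ("촉각에 민감한 당신", "직관으로 이끄는 당신", "감각과 직관을 오가는 당신"),
--     ("세부까지 놓치지 않는 당신", "감성을 우선하는 당신", "사고와 감정을 조화시키는 당신"),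
--     ("미리 움직이는 당신", "순간을 즐기는 당신", "계획과 즉흥이 공존하는 당신"),
-- ]
--
-- def _pair_sums(xs):
--     if len(xs) < 2:
--         return []
--     return [xs[0] + xs[1]] + _pair_sums(xs[2:])
--
-- def calculate_keywords_by_text(answers: List[str]) -> List[str]:
--     if len(answers) != 8:
--         raise ValueError("expected exactly 8 answers")
--     contrib = [int(any(w in q for w in plus)) - int(any(w in q for w in minus))
--                for q, (plus, minus) in zip(answers, _WORDS)]
--     return [gt if s > 0 else lt if s < 0 else eq
--             for s, (gt, lt, eq) in zip(_pair_sums(contrib), _KEYWORDS)]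
-- ===== Notes on version B (the rewrite author's own statement) =====
-- stated objective: alternative
-- what changed: Replaces A's eight pole counters and per-axis greater/less comparison with a single signed score per axis: each question contributes +1/0/-1 (plus-pole hit minus minus-pole hit), a recursive helper sums consecutive contributions pairwise, and the keyword is picked by the sign of that one integer.
import Mathlib
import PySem

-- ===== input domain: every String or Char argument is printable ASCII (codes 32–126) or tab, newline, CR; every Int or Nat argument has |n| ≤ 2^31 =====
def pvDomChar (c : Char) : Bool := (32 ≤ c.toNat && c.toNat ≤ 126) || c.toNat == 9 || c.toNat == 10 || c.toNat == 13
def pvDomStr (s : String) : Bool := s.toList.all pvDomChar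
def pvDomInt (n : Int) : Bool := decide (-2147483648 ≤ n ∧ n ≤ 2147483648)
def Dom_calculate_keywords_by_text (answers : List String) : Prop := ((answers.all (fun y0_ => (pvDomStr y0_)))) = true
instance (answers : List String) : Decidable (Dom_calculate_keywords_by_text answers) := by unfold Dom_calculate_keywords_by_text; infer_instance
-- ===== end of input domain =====

-- B replaces A's eight pole counters and greater/less tests by one signed ±1 contribution
-- per question, summed pairwise by a recursive helper, with a sign test per axis (objective: alternative).

-- ===== PORT A =====
def calculate_keywords_by_text (answers : List String) : List String :=
  match answers with
  | [q1, q2, q3, q4, q5, q6, q7, q8] =>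
    let e_score : Int := 0
    let i_score : Int := 0
    let s_score : Int := 0
    let n_score : Int := 0
    let t_score : Int := 0
    let f_score : Int := 0
    let j_score : Int := 0
    let p_score : Int := 0
    let e_score := if ["칫솔을", "바로"].any (fun word => PySem.Str.isIn word q1) then e_score + 1 else e_score
    let i_score := if ["수건으로", "닦고"].any (fun word => PySem.Str.isIn word q1) then i_score + 1 else i_score
    let e_score := if ["버튼", "분사해"].any (fun word => PySem.Str.isIn word q2) then e_score + 1 else e_score
    let i_score := if ["중간에", "내리는"].any (fun word => PySem.Str.isIn word q2) then i_score + 1 else i_score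
    let s_score := if ["알림처럼", "미리"].any (fun word => PySem.Str.isIn word q3) then s_score + 1 else s_score
    let n_score := if ["버스가", "가방에서 꺼내"].any (fun word => PySem.Str.isIn word q3) then n_score + 1 else n_score
    let s_score := if ["신호가 바뀌기 직전", "분사해"].any (fun word => PySem.Str.isIn word q4) then s_score + 1 else s_score
    let n_score := if ["기다리다", "향이 옅어지면"].any (fun word => PySem.Str.isIn word q4) then n_score + 1 else n_score
    let t_score := if ["공간", "퍼뜨린다"].any (fun word => PySem.Str.isIn word q5) then t_score + 1 else t_score
    let f_score := if ["기분", "헹굴 때마다"].any (fun word => PySem.Str.isIn word q5) then f_score + 1 else f_score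
    let t_score := if ["목줄", "가볍게"].any (fun word => PySem.Str.isIn word q6) then t_score + 1 else t_score
    let f_score := if ["손목에", "레이어링한다"].any (fun word => PySem.Str.isIn word q6) then f_score + 1 else f_score
    let j_score := if ["리모컨을", "채널을 돌리며"].any (fun word => PySem.Str.isIn word q7) then j_score + 1 else j_score
    let p_score := if ["광고가", "확실히"].any (fun word => PySem.Str.isIn word q7) then p_score + 1 else p_score
    let j_score := if ["이불 위에서", "잔향을"].any (fun word => PySem.Str.isIn word q8) then j_score + 1 else j_score
    let p_score := if ["중앙에서", "톡톡"].any (fun word => PySem.Str.isIn word q8) then p_score + 1 else p_score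
    let keyword1 := if e_score > i_score then "긍정적 임팩트를 가진 당신"
      else if e_score < i_score then "은은한 집중형인 당신" else "외향과 내향의 균형을 지닌 당신"
    let keyword2 := if s_score > n_score then "촉각에 민감한 당신"
      else if s_score < n_score then "직관으로 이끄는 당신" else "감각과 직관을 오가는 당신"
    let keyword3 := if t_score > f_score then "세부까지 놓치지 않는 당신"
      else if t_score < f_score then "감성을 우선하는 당신" else "사고와 감정을 조화시키는 당신"
    let keyword4 := if j_score > p_score then "미리 움직이는 당신"
      else if j_score < p_score then "순간을 즐기는 당신" else "계획과 즉흥이 공존하는 당신"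
    [keyword1, keyword2, keyword3, keyword4]
  | _ => []  -- Python raises ValueError here (excluded by Pre_)

-- ===== PORT B =====
-- Source B's _WORDS: per question, (plus-pole words, minus-pole words)
def pvWords : List (List String × List String) :=
  [ (["칫솔을", "바로"], ["수건으로", "닦고"]),
    (["버튼", "분사해"], ["중간에", "내리는"]),
    (["알림처럼", "미리"], ["버스가", "가방에서 꺼내"]),
    (["신호가 바뀌기 직전", "분사해"], ["기다리다", "향이 옅어지면"]),
    (["공간", "퍼뜨린다"], ["기분", "헹굴 때마다"]),
    (["목줄", "가볍게"], ["손목에", "레이어링한다"]),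
    (["리모컨을", "채널을 돌리며"], ["광고가", "확실히"]),
    (["이불 위에서", "잔향을"], ["중앙에서", "톡톡"]) ]

-- Source B's _KEYWORDS: per axis, (keyword if score > 0, if score < 0, if score = 0)
def pvKeywords : List (String × String × String) :=
  [ ("긍정적 임팩트를 가진 당신", "은은한 집중형인 당신", "외향과 내향의 균형을 지닌 당신"),
    ("촉각에 민감한 당신", "직관으로 이끄는 당신", "감각과 직관을 오가는 당신"),
    ("세부까지 놓치지 않는 당신", "감성을 우선하는 당신", "사고와 감정을 조화시키는 당신"),
    ("미리 움직이는 당신", "순간을 즐기는 당신", "계획과 즉흥이 공존하는 당신") ]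

-- Source B's _pair_sums: recursive pairwise sums of consecutive elements
def pvPairSums (xs : List Int) : List Int :=
  match xs with
  | [] => []
  | a :: tl =>
    match tl with
    | [] => []
    | b :: rest => (a + b) :: pvPairSums rest

def calculate_keywords_by_text_alt (answers : List String) : List String :=
  if answers.length ≠ 8 then []  -- Python raises ValueError here (excluded by Pre_)
  else
  let contrib := List.zipWith
    (fun q pm => (if pm.1.any (fun w => PySem.Str.isIn w q) then (1 : Int) else 0)
               - (if pm.2.any (fun w => PySem.Str.isIn w q) then (1 : Int) else 0))
    answers pvWords
  List.zipWith
    (fun s kw => if s > (0 : Int) then kw.1 else if s < 0 then kw.2.1 else kw.2.2)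
    (pvPairSums contrib) pvKeywords

-- ===== PRECONDITION & SPEC =====
-- Pre_: the 8-way unpacking in A raises ValueError unless the list has exactly 8 elements.
def Pre_calculate_keywords_by_text (answers : List String) : Prop := answers.length = 8
instance (answers : List String) : Decidable (Pre_calculate_keywords_by_text answers) := by
  unfold Pre_calculate_keywords_by_text; infer_instance
def pvWitness_calculate_keywords_by_text : List String := ["", "", "", "", "", "", "", ""]

def Spec_calculate_keywords_by_text (answers : List String) (out : List String) : Prop := out = calculate_keywords_by_text_alt answers
instance (answers : List String) (out : List String) : Decidable (Spec_calculate_keywords_by_text answers out) := by unfold Spec_calculate_keywords_by_text; infer_instance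

-- ===== CLAIM (what is proved, stated in full; the proofs are below) =====
def Claim_equal_calculate_keywords_by_text : Prop := ∀ (answers : List String), Dom_calculate_keywords_by_text answers → Pre_calculate_keywords_by_text answers → Spec_calculate_keywords_by_text answers (calculate_keywords_by_text answers)

-- ===== LEMMAS AND PROOFS =====

-- one axis: A's two sequentially-accumulated pole counters compared with > / <
-- versus B's sign test on the signed pairwise sum (c - d) + (c' - d')
theorem pvAxis_sign (c1 c2 d1 d2 : Bool) (g l e : String) :
    (let x : Int := if c1 then 0 + 1 else 0
     let x := if c2 then x + 1 else x
     let y : Int := if d1 then 0 + 1 else 0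
     let y := if d2 then y + 1 else y
     if x > y then g else if x < y then l else e) =
    (let s : Int := ((if c1 then 1 else 0) - (if d1 then 1 else 0))
                  + ((if c2 then 1 else 0) - (if d2 then 1 else 0))
     if s > 0 then g else if s < 0 then l else e) := by
  cases c1 <;> cases c2 <;> cases d1 <;> cases d2 <;> simp

-- ===== VERDICT (by name: the statement is the Claim_ definition above) =====
theorem calculate_keywords_by_text_spec : Claim_equal_calculate_keywords_by_text := by
  intro answers _dom hpre
  unfold Spec_calculate_keywords_by_text
  unfold Pre_calculate_keywords_by_text at hpre
  match answers, hpre with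
  | [q1, q2, q3, q4, q5, q6, q7, q8], _ =>
    simp only [calculate_keywords_by_text, calculate_keywords_by_text_alt, pvWords,
      pvKeywords, List.zipWith, pvPairSums]
    exact congrArg₂ _ (pvAxis_sign _ _ _ _ _ _ _) (congrArg₂ _ (pvAxis_sign _ _ _ _ _ _ _)
      (congrArg₂ _ (pvAxis_sign _ _ _ _ _ _ _) (congrArg₂ _ (pvAxis_sign _ _ _ _ _ _ _) rfl)))
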